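-- pv_equiv track=rewrite | github.com/Ojo-Oluwagbenga/Omega_Classmanager | main/backend/utils.py | numberEncode
-- ===== SOURCE A (Python) =====
-- def numberEncode(code, encNum):
--
--     code = str(code).zfill(encNum)   #Pad on the left with zeros
--
--     Res = 'ZgBoFklNOaJKLM5XYh12pqr6wQRSTdefijAPbcU4mnVW0stuv78xyzGCDE3HI9'
--     tlenght = len(Res)
--     rtl = ''
--     cdLen = len(code)
--     former = 0
--     for i in range(cdLen):
--         ind = cdLen - i - 1
--         el = code[ind]
--         k = (Res.index(el) + encNum + ind + former) % tlenght
--         rtl += Res[k]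
--         former = k
--     return rtl
-- ===== SOURCE B (Python) =====
-- def numberEncode(code, encNum):
--     Res = 'ZgBoFklNOaJKLM5XYh12pqr6wQRSTdefijAPbcU4mnVW0stuv78xyzGCDE3HI9'
--     IDX = {c: j for j, c in enumerate(Res)}
--     s = str(code).zfill(encNum)
--     n = len(s)
--     # cumulative sums of the alphabet indices of the reversed string
--     csum = [0]
--     for ch in reversed(s):
--         csum.append(csum[-1] + IDX[ch])
--     # output position i: A's chained value is the prefix sum of the terms
--     # IDX + encNum + position; the position part telescopes to a difference
--     # of triangular numbers, so only the character part needs the cumsum.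
--     tri = lambda m: m * (m - 1) // 2
--     return ''.join(Res[(csum[i + 1] + (i + 1) * encNum + tri(n) - tri(n - 1 - i)) % len(Res)]
--                    for i in range(n))
-- ===== Notes on version B (the rewrite author's own statement) =====
-- stated objective: alternative
-- what changed: B drops A's chained 'former' state entirely: it builds a char->index dict once, takes one cumulative sum over only the character indices of the reversed string, and computes each output index by the closed form csum[i+1] + (i+1)*encNum + tri(n) - tri(n-1-i) mod 62, using that A's chained positional terms telescope to a triangular-number difference.
-- outside the precondition, e.g. on numberEncode(-5, 3): A raises ValueError, B raises KeyError
import Mathlib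
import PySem

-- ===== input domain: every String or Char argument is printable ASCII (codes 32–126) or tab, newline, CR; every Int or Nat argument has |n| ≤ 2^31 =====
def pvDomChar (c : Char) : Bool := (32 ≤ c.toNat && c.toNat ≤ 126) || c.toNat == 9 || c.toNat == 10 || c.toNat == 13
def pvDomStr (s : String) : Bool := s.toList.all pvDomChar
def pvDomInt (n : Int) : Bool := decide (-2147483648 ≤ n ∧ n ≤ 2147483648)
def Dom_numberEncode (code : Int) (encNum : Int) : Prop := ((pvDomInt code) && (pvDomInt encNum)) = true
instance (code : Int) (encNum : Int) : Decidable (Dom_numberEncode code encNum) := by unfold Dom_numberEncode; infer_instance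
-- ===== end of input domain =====

-- B removes A's chained 'former' state: a char->index dict, one cumulative sum of character indices of the reversed string, and a closed-form triangular-number term per output position (alternative decomposition, similar cost).


-- shared constant data: the alphabet string both Pythons write out verbatim
def pvRes : List Char := "ZgBoFklNOaJKLM5XYh12pqr6wQRSTdefijAPbcU4mnVW0stuv78xyzGCDE3HI9".toList

-- ===== PORT A =====
-- transliteration of A: one loop over range(cdLen) carrying (rtl, former)
def numberEncode (code : Int) (encNum : Int) : String :=
  let codeL := PySem.Chars.zfill (PySem.Int.toChars code) encNum
  let tlenght : Int := (pvRes.length : Int)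
  let cdLen : Int := (codeL.length : Int)
  let st := (PySem.List.pyRange 0 cdLen 1).foldl
    (fun (acc : List Char × Int) i =>
      let ind := cdLen - i - 1
      let el := PySem.List.pyGetD codeL ind ' '                  -- code[ind], always in range here
      let k := PySem.Int.mod (((PySem.List.index? pvRes el).getD 0 : Int) + encNum + ind + acc.2) tlenght
        -- Res.index(el); Pre_ guarantees el ∈ pvRes (ValueError excluded)
      (acc.1 ++ [PySem.List.pyGetD pvRes k ' '], k))
    ([], 0)
  String.ofList st.1

-- ===== PORT B =====
-- Source B's dict comprehension {c: j for j, c in enumerate(Res)}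
def pvIDX : PySem.Dict Char Int :=
  (PySem.List.enumerate pvRes 0).foldl (fun d p => d.insert p.2 p.1) PySem.Dict.empty

-- Source B's 'tri = lambda m: m * (m - 1) // 2'
def pvTri (m : Int) : Int := PySem.Int.floordiv (m * (m - 1)) 2

-- transliteration of Source B: cumsum of alphabet indices of reversed(s), then the
-- closed-form index per output position
def numberEncode_alt (code : Int) (encNum : Int) : String :=
  let s := PySem.Chars.zfill (PySem.Int.toChars code) encNum
  let n : Int := (s.length : Int)
  let csum := s.reverse.foldl
    (fun (acc : List Int) ch => acc ++ [PySem.List.pyGetD acc (-1) 0 + pvIDX.getD ch 0]) [(0 : Int)]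
      -- IDX[ch]; Pre_ guarantees ch ∈ pvRes (KeyError excluded)
  String.ofList ((PySem.List.pyRange 0 n 1).map (fun i =>
    PySem.List.pyGetD pvRes
      (PySem.Int.mod (PySem.List.pyGetD csum (i + 1) 0 + (i + 1) * encNum + pvTri n - pvTri (n - 1 - i))
        (pvRes.length : Int)) ' '))

-- ===== PRECONDITION & SPEC =====
-- Pre_ excludes code < 0: there str(code) contains '-', absent from Res, and A raises ValueError (B raises KeyError).
def Pre_numberEncode (code : Int) (encNum : Int) : Prop := 0 ≤ code
instance (code : Int) (encNum : Int) : Decidable (Pre_numberEncode code encNum) := by unfold Pre_numberEncode; infer_instance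
def pvWitness_numberEncode : Int × Int := (1234, 6)

def Spec_numberEncode (code : Int) (encNum : Int) (out : String) : Prop := out = numberEncode_alt code encNum
instance (code : Int) (encNum : Int) (out : String) : Decidable (Spec_numberEncode code encNum out) := by unfold Spec_numberEncode; infer_instance

-- ===== CLAIM =====
def Claim_equal_numberEncode : Prop := ∀ (code : Int) (encNum : Int), Dom_numberEncode code encNum → Pre_numberEncode code encNum → Spec_numberEncode code encNum (numberEncode code encNum)

-- ===== LEMMAS AND PROOFS =====

-- proof-side recursive prefix-sum helper
def pvScan (S : Int) : List Int → List Int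
  | [] => []
  | t :: ts => (S + t) :: pvScan (S + t) ts

theorem pvScan_length (ts : List Int) (S : Int) : (pvScan S ts).length = ts.length := by
  induction ts generalizing S with
  | nil => rfl
  | cons t ts ih => simp [pvScan, ih]

theorem pvScan_getElem? (ts : List Int) (S : Int) (k : Nat) (hk : k < ts.length) :
    (pvScan S ts)[k]? = some (S + (ts.take (k + 1)).sum) := by
  induction ts generalizing S k with
  | nil => simp at hk
  | cons t ts ih =>
    cases k with
    | zero => simp [pvScan]
    | succ k =>
      simp only [pvScan, List.getElem?_cons_succ]
      rw [ih (S + t) k (by simpa using hk)]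
      simp [add_assoc]

-- A's chained fold equals mapping (mod L) over the prefix sums, for any term function g
theorem pvChain (L : Int) (hL : 0 < L) (g : Int → Int) (is : List Int) (acc : List Char) (S : Int) :
    (is.foldl (fun (p : List Char × Int) i =>
        let k := PySem.Int.mod (g i + p.2) L
        (p.1 ++ [PySem.List.pyGetD pvRes k ' '], k)) (acc, PySem.Int.mod S L)).1
      = acc ++ (pvScan S (is.map g)).map (fun v => PySem.List.pyGetD pvRes (PySem.Int.mod v L) ' ') := by
  induction is generalizing acc S with
  | nil => simp [pvScan]
  | cons i is ih =>
    have hmod : PySem.Int.mod (g i + PySem.Int.mod S L) L = PySem.Int.mod (S + g i) L := by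
      simp only [PySem.Int.mod_eq_emod_of_pos hL]
      rw [Int.add_emod, Int.emod_emod_of_dvd _ dvd_rfl, ← Int.add_emod, Int.add_comm]
    simp only [List.foldl, List.map, pvScan, hmod]
    rw [ih]
    simp [List.append_assoc]

-- the dict built by Source B's comprehension looks up the first index, exactly like Res.index
theorem pvDictFold (L : List Char) (s : Int) (d : PySem.Dict Char Int) (c : Char)
    (hnd : L.Nodup) (hd : ∀ k ∈ L, d.get? k = none) :
    ((PySem.List.enumerate L s).foldl (fun d p => d.insert p.2 p.1) d).get? c
      = match PySem.List.index? L c with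
        | some k => some (s + (k : Int))
        | none => d.get? c := by
  induction L generalizing s d with
  | nil => simp [PySem.List.enumerate_nil, PySem.List.index?]
  | cons x xs ih =>
    rw [PySem.List.enumerate_cons]
    simp only [List.foldl]
    have hnd' : xs.Nodup := (List.nodup_cons.mp hnd).2
    have hx : x ∉ xs := (List.nodup_cons.mp hnd).1
    rw [ih (s + 1) (d.insert x s) hnd'
        (fun k hk => by
          rw [PySem.Dict.get?_insert_of_ne _ _ (by rintro rfl; exact hx hk)]
          exact hd k (List.mem_cons_of_mem _ hk))]
    by_cases hc : x = c
    · subst hc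
      have h1 : PySem.List.index? xs x = none := (PySem.List.index?_eq_none_iff xs x).mpr hx
      rw [h1, PySem.List.index?_cons_self x xs, PySem.Dict.get?_insert_self]
      simp
    · rw [PySem.List.index?_cons_of_ne xs hc]
      cases h : PySem.List.index? xs c with
      | some k =>
        simp only [Option.map_some]
        push_cast
        ring_nf
      | none =>
        simp [PySem.Dict.get?_insert_of_ne _ _ (fun h' => hc h'.symm)]

theorem pvIDX_getD (c : Char) :
    pvIDX.getD c 0 = ((PySem.List.index? pvRes c).getD 0 : Int) := by
  have hget : pvIDX.get? c
      = match PySem.List.index? pvRes c with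
        | some k => some ((0 : Int) + (k : Int))
        | none => PySem.Dict.empty.get? c :=
    pvDictFold pvRes 0 PySem.Dict.empty c (by decide) (fun k _ => PySem.Dict.get?_empty k)
  rw [PySem.Dict.getD_eq_get?_getD, hget]
  cases h : PySem.List.index? pvRes c with
  | some k => simp
  | none => simp [PySem.Dict.get?_empty]

-- Source B's cumsum loop appends exactly the prefix sums: acc ++ pvScan (last acc) (values)
theorem pvCsumFold (l : List Char) (v : Char → Int) (acc : List Int) (S : Int)
    (h : PySem.List.pyGetD acc (-1) 0 = S) :
    l.foldl (fun acc ch => acc ++ [PySem.List.pyGetD acc (-1) 0 + v ch]) acc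
      = acc ++ pvScan S (l.map v) := by
  induction l generalizing acc S with
  | nil => simp [pvScan]
  | cons x xs ih =>
    simp only [List.foldl, List.map, pvScan, h]
    rw [ih (acc ++ [S + v x]) (S + v x) (PySem.List.pyGetD_neg_one_append_singleton _ _ _)]
    simp [List.append_assoc]

-- tri(m+1) = tri(m) + m : m*(m-1) is even, so // 2 is exact
theorem pvTri_succ (m : Int) : pvTri (m + 1) = pvTri m + m := by
  obtain ⟨t, ht⟩ : ∃ t, m * (m - 1) = 2 * t := by
    rcases Int.even_or_odd m with ⟨a, ha⟩ | ⟨a, ha⟩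
    · exact ⟨a * (m - 1), by rw [ha]; ring⟩
    · exact ⟨m * a, by rw [ha]; ring⟩
  have h1 : pvTri m = t := by
    unfold pvTri
    exact (PySem.Int.floordiv_eq_iff_of_pos (by norm_num)).2 ⟨by omega, by omega⟩
  have h2 : pvTri (m + 1) = t + m := by
    unfold pvTri
    have key : (m + 1) * (m + 1 - 1) = 2 * (t + m) := by
      rw [show (m + 1) * (m + 1 - 1) = m * (m - 1) + 2 * m by ring, ht]; ring
    rw [key]
    exact (PySem.Int.floordiv_eq_iff_of_pos (by norm_num)).2 ⟨by omega, by omega⟩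
  omega

-- a take of the prefix of an Int list, as a sum over range
theorem pvSumTake (l : List Int) (m : Nat) (hm : m ≤ l.length) :
    (l.take m).sum = ((List.range m).map (fun j => l.getD j 0)).sum := by
  induction m with
  | zero => simp
  | succ m ih =>
    rw [List.take_succ, List.range_succ]
    simp only [List.sum_append, List.map_append, List.map_cons, List.map_nil]
    rw [ih (by omega)]
    have : l[m]? = some l[m] := List.getElem?_eq_getElem (by omega)
    simp [this, List.getD, ‹l[m]? = some l[m]›]

-- the arithmetic heart: the positional terms telescope to a triangular difference
theorem pvKeySum (e n : Int) (u : Nat → Int) :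
    ∀ k : Nat, (k : Int) < n →
      ((List.range (k + 1)).map (fun j => u j + e + (n - 1 - (j : Int)))).sum
        = ((List.range (k + 1)).map u).sum + ((k : Int) + 1) * e + pvTri n - pvTri (n - 1 - (k : Int)) := by
  intro k
  induction k with
  | zero =>
    intro hk
    have h := pvTri_succ (n - 1)
    rw [show n - 1 + 1 = n by ring] at h
    simp only [List.range_succ, List.range_zero, List.nil_append, List.map_cons, List.map_nil,
      List.sum_cons, List.sum_nil]
    push_cast
    rw [show n - 1 - (0 : Int) = n - 1 by ring]
    linear_combination -h
  | succ k ih =>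
    intro hk
    have hk' : (k : Int) < n := by push_cast at hk ⊢; omega
    have ihh := ih hk'
    rw [List.range_succ, List.map_append, List.map_append, List.sum_append, List.sum_append, ihh]
    have h := pvTri_succ (n - 1 - ((k : Int) + 1))
    rw [show n - 1 - ((k : Int) + 1) + 1 = n - 1 - (k : Int) by ring] at h
    simp only [List.map_cons, List.map_nil, List.sum_cons, List.sum_nil]
    push_cast
    linear_combination -h

-- ===== VERDICT (by name: the statement is the Claim_ definition above) =====
theorem numberEncode_spec : Claim_equal_numberEncode := by
  intro code encNum _ _
  unfold Spec_numberEncode numberEncode numberEncode_alt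
  simp only []
  set s := PySem.Chars.zfill (PySem.Int.toChars code) encNum with hs
  set n : Int := (s.length : Int) with hn
  set g : Int → Int := fun i =>
    ((PySem.List.index? pvRes (PySem.List.pyGetD s (n - 1 - i) ' ')).getD 0 : Int)
      + encNum + (n - 1 - i) with hg
  have h0 : (0 : Int) = PySem.Int.mod 0 (pvRes.length : Int) := by decide
  -- A's fold into pvChain shape
  have hA : ((PySem.List.pyRange 0 n 1).foldl
      (fun (acc : List Char × Int) i =>
        let ind := n - i - 1
        let el := PySem.List.pyGetD s ind ' '
        let k := PySem.Int.mod (((PySem.List.index? pvRes el).getD 0 : Int) + encNum + ind + acc.2) (pvRes.length : Int)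
        (acc.1 ++ [PySem.List.pyGetD pvRes k ' '], k)) ([], 0)).1
      = (pvScan 0 ((PySem.List.pyRange 0 n 1).map g)).map
          (fun v => PySem.List.pyGetD pvRes (PySem.Int.mod v (pvRes.length : Int)) ' ') := by
    have hstep : ((PySem.List.pyRange 0 n 1).foldl
        (fun (acc : List Char × Int) i =>
          let ind := n - i - 1
          let el := PySem.List.pyGetD s ind ' '
          let k := PySem.Int.mod (((PySem.List.index? pvRes el).getD 0 : Int) + encNum + ind + acc.2) (pvRes.length : Int)
          (acc.1 ++ [PySem.List.pyGetD pvRes k ' '], k)) ([], 0))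
        = ((PySem.List.pyRange 0 n 1).foldl
        (fun (p : List Char × Int) i =>
          let k := PySem.Int.mod (g i + p.2) (pvRes.length : Int)
          (p.1 ++ [PySem.List.pyGetD pvRes k ' '], k)) ([], PySem.Int.mod 0 (pvRes.length : Int))) := by
      rw [← h0]
      apply PySem.List.foldl_congr_mem
      intro b i hi
      have he : n - i - 1 = n - 1 - i := by ring
      simp only [hg, he]
    rw [hstep, pvChain _ (by decide) g (PySem.List.pyRange 0 n 1) [] 0]
    simp
  rw [hA]
  -- B's csum into pvScan shape
  set v : Char → Int := fun ch => pvIDX.getD ch 0 with hv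
  have hcsum : s.reverse.foldl
      (fun (acc : List Int) ch => acc ++ [PySem.List.pyGetD acc (-1) 0 + pvIDX.getD ch 0]) [(0 : Int)]
      = [(0 : Int)] ++ pvScan 0 (s.reverse.map v) := by
    exact pvCsumFold s.reverse v [(0 : Int)] 0 (by decide)
  rw [hcsum]
  -- elementwise comparison
  congr 1
  apply List.ext_getElem
  · simp [pvScan_length, PySem.List.length_pyRange_one]
  intro k h1 h2
  have hkN : k < s.length := by
    simp [pvScan_length, PySem.List.length_pyRange_one, hn] at h1
    omega
  apply Option.some_injective
  rw [← List.getElem?_eq_getElem h1, ← List.getElem?_eq_getElem h2]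
  have hkn : (k : Int) < n := by rw [hn]; exact_mod_cast hkN
  -- lengths
  have hlenA : ((PySem.List.pyRange 0 n 1).map g).length = s.length := by
    simp [PySem.List.length_pyRange_one, hn]
  have hlenS : (pvScan 0 ((PySem.List.pyRange 0 n 1).map g)).length = s.length := by
    rw [pvScan_length, hlenA]
  -- LHS element
  rw [List.getElem?_map, pvScan_getElem? _ _ k (by omega)]
  -- RHS element
  rw [hn, PySem.List.getElem?_map_pyRange_zero _ s.length k hkN]
  simp only [Option.map_some]
  congr 2
  -- reduce csum lookup
  have hcget : PySem.List.pyGetD ([(0 : Int)] ++ pvScan 0 (s.reverse.map v)) ((k : Int) + 1) 0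
      = 0 + ((s.reverse.map v).take (k + 1)).sum := by
    have hcast : ((k : Int) + 1) = ((k + 1 : Nat) : Int) := by push_cast; ring
    rw [hcast, PySem.List.pyGetD_natCast]
    have hlen : (pvScan 0 (s.reverse.map v)).length = s.length := by
      rw [pvScan_length]; simp
    have hshift : ([(0 : Int)] ++ pvScan 0 (s.reverse.map v)).getD (k + 1) 0
        = (pvScan 0 (s.reverse.map v)).getD k 0 := by
      simp [List.getD]
    rw [hshift, List.getD, pvScan_getElem? _ _ k (by simpa using hkN)]
    rfl
  rw [hcget]
  -- both sides as range sums
  have htakeA : (((PySem.List.pyRange 0 n 1).map g).take (k + 1)).sum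
      = ((List.range (k + 1)).map (fun (j : Nat) => g (j : Int))).sum := by
    rw [pvSumTake _ _ (by omega)]
    refine congrArg List.sum ?_
    apply List.map_congr_left
    intro j hj
    have hjk : j < k + 1 := List.mem_range.mp hj
    have hget : ((PySem.List.pyRange 0 n 1).map g).getD j 0 = g (j : Int) := by
      have h := PySem.List.getElem?_map_pyRange_zero g s.length j (by omega)
      rw [hn]
      simp [List.getD, h]
    rw [hget]
  have htakeB : ((s.reverse.map v).take (k + 1)).sum
      = ((List.range (k + 1)).map (fun (j : Nat) => v (s.reverse.getD j ' '))).sum := by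
    rw [pvSumTake _ _ (by simpa using (by omega : k + 1 ≤ s.length))]
    refine congrArg List.sum ?_
    apply List.map_congr_left
    intro j hj
    have hjk : j < k + 1 := List.mem_range.mp hj
    have hjN : j < s.reverse.length := by simpa using (by omega : j < s.length)
    have hjM : j < (s.reverse.map v).length := by simpa using hjN
    rw [List.getD_eq_getElem _ _ hjM, List.getD_eq_getElem _ _ hjN]
    simp only [List.getElem_map]
  rw [htakeA, htakeB]
  -- per-term equality of A's terms with u j + e + (n-1-j)
  set u : Nat → Int := fun j => v (s.reverse.getD j ' ') with hu
  have hterm : ((List.range (k + 1)).map (fun (j : Nat) => g (j : Int)))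
      = ((List.range (k + 1)).map (fun (j : Nat) => u j + encNum + (n - 1 - (j : Int)))) := by
    apply List.map_congr_left
    intro j hj
    have hjk : j < k + 1 := List.mem_range.mp hj
    have hjN : j < s.length := by omega
    have hidx : n - 1 - (j : Int) = ((s.length - 1 - j : Nat) : Int) := by
      rw [hn]; push_cast; omega
    have hsj : PySem.List.pyGetD s (n - 1 - (j : Int)) ' ' = s.getD (s.length - 1 - j) ' ' := by
      rw [hidx, PySem.List.pyGetD_natCast]
    have hrev : s.reverse.getD j ' ' = s.getD (s.length - 1 - j) ' ' := by
      rw [List.getD_eq_getElem _ _ (by simpa using hjN),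
          List.getD_eq_getElem _ _ (by omega : s.length - 1 - j < s.length)]
      simp [List.getElem_reverse]
    simp only [hg, hu, hv, hsj, hrev, pvIDX_getD]
  rw [hterm, pvKeySum encNum n u k hkn, hn]
  ring
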